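-- pv_equiv track=rewrite | github.com/stanbies/coc_analysis | api/streamlit_app.py | get_max_level_for_th
-- ===== SOURCE A (Python) =====
-- def get_max_level_for_th(item_name, th_level, level_dict):
--     """Get the max level available at the previous TH."""
--     prev_th = th_level - 1
--     if item_name not in level_dict:
--         return None
--     levels = level_dict[item_name]
--     for th in range(prev_th, 0, -1):
--         if th in levels:
--             return levels[th]
--     return None
-- ===== SOURCE B (Python) =====
-- def get_max_level_for_th(item_name, th_level, level_dict):
--     """Get the max level available at the previous TH."""
--     if item_name not in level_dict:
--         return None
--     levels = level_dict[item_name]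
--     prev_th = th_level - 1
--     valid = [th for th in levels if 0 < th <= prev_th]
--     return levels[max(valid)] if valid else None
-- ===== Notes on version B (the rewrite author's own statement) =====
-- stated objective: idiomatic
-- what changed: Instead of probing every TH in a descending range and returning at the first present key, B filters the dict's own keys to the window 0 < th <= th_level-1 and reduces with max, so the work depends on the number of keys rather than on th_level.
import Mathlib
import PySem

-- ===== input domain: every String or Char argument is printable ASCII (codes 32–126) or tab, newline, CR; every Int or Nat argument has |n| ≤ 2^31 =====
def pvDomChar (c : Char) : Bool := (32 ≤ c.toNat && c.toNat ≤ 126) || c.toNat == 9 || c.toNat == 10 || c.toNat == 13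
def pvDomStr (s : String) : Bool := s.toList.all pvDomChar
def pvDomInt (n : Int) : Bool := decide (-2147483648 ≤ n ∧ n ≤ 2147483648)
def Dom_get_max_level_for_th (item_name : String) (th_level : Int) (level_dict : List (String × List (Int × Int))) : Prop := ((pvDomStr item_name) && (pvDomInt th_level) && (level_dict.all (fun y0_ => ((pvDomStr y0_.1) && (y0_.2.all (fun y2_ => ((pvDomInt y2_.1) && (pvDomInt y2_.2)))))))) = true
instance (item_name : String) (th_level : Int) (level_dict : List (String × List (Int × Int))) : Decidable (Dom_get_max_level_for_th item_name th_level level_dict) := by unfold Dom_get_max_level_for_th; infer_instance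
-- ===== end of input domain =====

-- B replaces A's descending-range probe loop by a filter of the dict's own keys reduced with max (idiomatic; same result).

-- ===== PORT A =====
-- A: prev_th := th_level - 1; if the item is absent return none; else scan th = prev_th, prev_th-1, …, 1
-- and return levels[th] at the first th present (findSome? returns the first present key's value, exactly the loop).
def get_max_level_for_th (item_name : String) (th_level : Int) (level_dict : List (String × List (Int × Int))) : Option Int :=
  let prev_th := th_level - 1
  let d := PySem.Dict.ofList level_dict
  match d.get? item_name with
  | none => none
  | some lv =>
    let levels := PySem.Dict.ofList lv
    (PySem.List.pyRange prev_th 0 (-1)).findSome? (fun th => levels.get? th)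

-- ===== PORT B =====
-- B: filter the keys of levels to the window 0 < th ≤ th_level - 1, then look the max up.
def get_max_level_for_th_alt (item_name : String) (th_level : Int) (level_dict : List (String × List (Int × Int))) : Option Int :=
  let d := PySem.Dict.ofList level_dict
  match d.get? item_name with
  | none => none
  | some lv =>
    let levels := PySem.Dict.ofList lv
    let prev_th := th_level - 1
    let valid := levels.keys.filter (fun th => decide (0 < th) && decide (th ≤ prev_th))
    match PySem.List.max? valid (fun x => x) with
    | none => none
    | some m => levels.get? m

-- ===== PRECONDITION & SPEC =====
def Spec_get_max_level_for_th (item_name : String) (th_level : Int) (level_dict : List (String × List (Int × Int))) (out : Option Int) : Prop := out = get_max_level_for_th_alt item_name th_level level_dict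
instance (item_name : String) (th_level : Int) (level_dict : List (String × List (Int × Int))) (out : Option Int) : Decidable (Spec_get_max_level_for_th item_name th_level level_dict out) := by unfold Spec_get_max_level_for_th; infer_instance

-- ===== CLAIM (what is proved, stated in full; the proofs are below) =====
def Claim_equal_get_max_level_for_th : Prop := ∀ (item_name : String) (th_level : Int) (level_dict : List (String × List (Int × Int))), Dom_get_max_level_for_th item_name th_level level_dict → Spec_get_max_level_for_th item_name th_level level_dict (get_max_level_for_th item_name th_level level_dict)

-- ===== LEMMAS AND PROOFS =====

-- The core: scanning prev, prev-1, …, 1 for the first present key of `levels`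
-- equals looking up the max of the keys in the window (0, prev].
theorem scan_nat (levels : PySem.Dict Int Int) (n : Nat) :
    (PySem.List.pyRange (n : Int) 0 (-1)).findSome? (fun th => levels.get? th)
      = match PySem.List.max? (levels.keys.filter (fun th => decide (0 < th) && decide (th ≤ (n : Int)))) (fun x => x) with
        | none => none
        | some m => levels.get? m := by
  induction n with
  | zero =>
    have hr : PySem.List.pyRange (0 : Int) 0 (-1) = [] := PySem.List.pyRange_neg_one_eq_nil le_rfl
    have hf : levels.keys.filter (fun th => decide (0 < th) && decide (th ≤ (0 : Int))) = [] := by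
      apply List.filter_eq_nil_iff.mpr
      intro th _
      simp only [Bool.and_eq_true, decide_eq_true_eq, not_and]
      omega
    have hm : PySem.List.max? ([] : List Int) (fun x => x) = none := (PySem.List.max?_eq_none_iff _ _).mpr rfl
    simp only [Nat.cast_zero, hr, hf, hm, List.findSome?_nil]
  | succ n ih =>
    have hr : PySem.List.pyRange ((n : Int) + 1) 0 (-1)
        = ((n : Int) + 1) :: PySem.List.pyRange (n : Int) 0 (-1) := by
      have := PySem.List.pyRange_neg_one_cons (a := (n : Int) + 1) (b := 0) (by positivity)
      simpa using this
    push_cast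
    rw [hr]
    cases hv : levels.get? ((n : Int) + 1) with
    | some v =>
      have hmem : ((n : Int) + 1) ∈ levels.keys := by
        by_contra hk
        rw [(PySem.Dict.get?_eq_none_iff_not_mem_keys _ _).mpr hk] at hv
        simp at hv
      have hfmem : ((n : Int) + 1) ∈ levels.keys.filter (fun th => decide (0 < th) && decide (th ≤ (n : Int) + 1)) := by
        refine List.mem_filter.mpr ⟨hmem, ?_⟩
        simp only [Bool.and_eq_true, decide_eq_true_eq]
        omega
      obtain ⟨m, hm⟩ : ∃ m, PySem.List.max? (levels.keys.filter (fun th => decide (0 < th) && decide (th ≤ (n : Int) + 1))) (fun x => x) = some m := by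
        cases hmx : PySem.List.max? (levels.keys.filter (fun th => decide (0 < th) && decide (th ≤ (n : Int) + 1))) (fun x => x) with
        | none =>
          rw [PySem.List.max?_eq_none_iff] at hmx
          rw [hmx] at hfmem
          exact absurd hfmem List.not_mem_nil
        | some m => exact ⟨m, rfl⟩
      have hmmem := PySem.List.max?_mem hm
      have hle : ((n : Int) + 1) ≤ m := PySem.List.max?_isMax hm _ hfmem
      have hub : m ≤ (n : Int) + 1 := by
        have := List.mem_filter.mp hmmem
        simp only [Bool.and_eq_true, decide_eq_true_eq] at this
        exact this.2.2
      have hm1 : m = (n : Int) + 1 := le_antisymm hub hle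
      rw [List.findSome?_cons, hv, hm, hm1]
      simp [hv]
    | none =>
      have hnk : ((n : Int) + 1) ∉ levels.keys := (PySem.Dict.get?_eq_none_iff_not_mem_keys _ _).mp hv
      have hf : levels.keys.filter (fun th => decide (0 < th) && decide (th ≤ (n : Int) + 1))
          = levels.keys.filter (fun th => decide (0 < th) && decide (th ≤ (n : Int))) := by
        apply List.filter_congr
        intro th hth
        have hne : th ≠ (n : Int) + 1 := fun h => hnk (h ▸ hth)
        have hiff : (th ≤ (n : Int) + 1) ↔ th ≤ (n : Int) := by omega
        simp [hiff]
      rw [List.findSome?_cons, hv, hf]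
      exact ih

theorem scan_eq_maxfilter (levels : PySem.Dict Int Int) (prev : Int) :
    (PySem.List.pyRange prev 0 (-1)).findSome? (fun th => levels.get? th)
      = match PySem.List.max? (levels.keys.filter (fun th => decide (0 < th) && decide (th ≤ prev))) (fun x => x) with
        | none => none
        | some m => levels.get? m := by
  by_cases h : prev ≤ 0
  · have hr : PySem.List.pyRange prev 0 (-1) = [] := PySem.List.pyRange_neg_one_eq_nil h
    have hf : levels.keys.filter (fun th => decide (0 < th) && decide (th ≤ prev)) = [] := by
      apply List.filter_eq_nil_iff.mpr
      intro th _
      simp only [Bool.and_eq_true, decide_eq_true_eq, not_and]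
      omega
    have hm : PySem.List.max? ([] : List Int) (fun x => x) = none := (PySem.List.max?_eq_none_iff _ _).mpr rfl
    simp only [hr, hf, hm, List.findSome?_nil]
  · have hp : ((prev.toNat : Int)) = prev := Int.toNat_of_nonneg (by omega)
    rw [← hp]
    exact scan_nat levels prev.toNat

-- ===== VERDICT (by name: the statement is the Claim_ definition above) =====
theorem get_max_level_for_th_spec : Claim_equal_get_max_level_for_th := by
  intro item_name th_level level_dict _
  unfold Spec_get_max_level_for_th get_max_level_for_th get_max_level_for_th_alt
  cases h : (PySem.Dict.ofList level_dict).get? item_name with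
  | none => simp [h]
  | some lv => simp only [h]; exact scan_eq_maxfilter _ _
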